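-- pv_equiv track=rewrite | github.com/rwydaegh/goliat | cli/run_parallel_studies.py | calculate_split_factors
-- ===== SOURCE A (Python) =====
-- def calculate_split_factors(num_phantoms, num_items, target_splits):
--     """
--     Calculate optimal splitting factors for phantoms and items (frequencies/antennas).
--     Prioritizes splitting phantoms first, then items.
--
--     Returns: (phantom_splits, item_splits) where phantom_splits * item_splits = target_splits
--     """
--     # Find all factor pairs of target_splits
--     factors = []
--     for i in range(1, target_splits + 1):
--         if target_splits % i == 0:
--             factors.append((i, target_splits // i))
--
--     # Prioritize phantom splitting: choose the largest phantom split factor that's <= num_phantoms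
--     best_phantom_splits = 1
--     best_item_splits = target_splits
--
--     for phantom_factor, item_factor in factors:
--         if phantom_factor <= num_phantoms and item_factor <= num_items:
--             # Valid split: both dimensions have enough items
--             if phantom_factor > best_phantom_splits:
--                 # Prefer more phantom splits (prioritize phantom splitting)
--                 best_phantom_splits = phantom_factor
--                 best_item_splits = item_factor
--
--     return best_phantom_splits, best_item_splits
-- ===== SOURCE B (Python) =====
-- def calculate_split_factors(num_phantoms, num_items, target_splits):
--     """Scan candidate phantom factors downward from min(num_phantoms, target_splits);
--     the first divisor whose cofactor fits num_items is the best pair."""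
--     d = min(num_phantoms, target_splits)
--     while d > 1:
--         if target_splits % d == 0 and target_splits // d <= num_items:
--             return d, target_splits // d
--         d -= 1
--     return 1, target_splits
-- ===== Notes on version B (the rewrite author's own statement) =====
-- stated objective: faster
-- what changed: Instead of enumerating all of range(1, target_splits+1) to build the full factor-pair list and then folding over it for the best valid pair, B scans candidate phantom factors downward from min(num_phantoms, target_splits) and returns at the first divisor whose cofactor fits num_items (the first hit of the descending scan is the maximum valid factor), building no list at all.
import Mathlib
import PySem

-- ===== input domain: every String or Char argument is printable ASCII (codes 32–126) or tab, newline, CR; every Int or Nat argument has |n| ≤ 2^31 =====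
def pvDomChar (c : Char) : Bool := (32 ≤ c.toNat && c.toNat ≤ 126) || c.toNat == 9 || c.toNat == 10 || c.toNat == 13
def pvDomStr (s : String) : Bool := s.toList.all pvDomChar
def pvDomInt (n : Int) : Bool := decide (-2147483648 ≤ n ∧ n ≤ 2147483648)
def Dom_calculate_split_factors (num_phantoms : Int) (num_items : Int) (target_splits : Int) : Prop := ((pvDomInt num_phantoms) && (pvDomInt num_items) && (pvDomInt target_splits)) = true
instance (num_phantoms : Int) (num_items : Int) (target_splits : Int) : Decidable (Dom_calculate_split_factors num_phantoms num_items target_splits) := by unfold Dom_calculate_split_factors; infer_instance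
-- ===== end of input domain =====

-- B replaces A's build-all-factor-pairs-then-select with a single descending scan that
-- returns at the first valid divisor (alternative decomposition; no factor list is built).
-- The Python returns a 2-tuple; per this task's signature it is ported as a 2-element List Int.

-- ===== PORT A =====
def calculate_split_factors (num_phantoms : Int) (num_items : Int) (target_splits : Int) : List Int :=
  -- factors = [(i, target_splits // i) for i in range(1, target_splits+1) if target_splits % i == 0]
  let factors : List (Int × Int) :=
    (PySem.List.pyRange 1 (target_splits + 1) 1).foldl
      (fun acc i =>
        if PySem.Int.mod target_splits i = 0 then
          acc ++ [(i, PySem.Int.floordiv target_splits i)]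
        else acc) []
  -- selection loop over the factor pairs
  let best : Int × Int :=
    factors.foldl
      (fun (b : Int × Int) (f : Int × Int) =>
        if f.1 ≤ num_phantoms ∧ f.2 ≤ num_items then
          (if f.1 > b.1 then f else b)
        else b)
      (1, target_splits)
  [best.1, best.2]

-- ===== PORT B =====
-- B's while loop: d counts down from min(num_phantoms, target_splits); fuel bounds the iterations.
def csfGo (num_items : Int) (target_splits : Int) : Int → Nat → List Int
  | d, Nat.succ fuel =>
    if 1 < d then
      if PySem.Int.mod target_splits d = 0 ∧ PySem.Int.floordiv target_splits d ≤ num_items then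
        [d, PySem.Int.floordiv target_splits d]
      else csfGo num_items target_splits (d - 1) fuel
    else [1, target_splits]
  | _, 0 => [1, target_splits]

def calculate_split_factors_alt (num_phantoms : Int) (num_items : Int) (target_splits : Int) : List Int :=
  csfGo num_items target_splits (min num_phantoms target_splits) (min num_phantoms target_splits).toNat

-- ===== PRECONDITION & SPEC =====
def Spec_calculate_split_factors (num_phantoms : Int) (num_items : Int) (target_splits : Int) (out : List Int) : Prop := out = calculate_split_factors_alt num_phantoms num_items target_splits
instance (num_phantoms : Int) (num_items : Int) (target_splits : Int) (out : List Int) : Decidable (Spec_calculate_split_factors num_phantoms num_items target_splits out) := by unfold Spec_calculate_split_factors; infer_instance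

-- ===== CLAIM (what is proved, stated in full; the proofs are below) =====
def Claim_equal_calculate_split_factors : Prop := ∀ (num_phantoms : Int) (num_items : Int) (target_splits : Int), Dom_calculate_split_factors num_phantoms num_items target_splits → Spec_calculate_split_factors num_phantoms num_items target_splits (calculate_split_factors num_phantoms num_items target_splits)

-- ===== LEMMAS AND PROOFS =====

-- maximum of {1} ∪ {d ∈ [2,K] | d a valid phantom factor for A's selection loop}
def csfMax (np ni t : Int) : Nat → Int
  | 0 => 1
  | Nat.succ k =>
    if 1 < ((k : Int) + 1) ∧ PySem.Int.mod t ((k : Int) + 1) = 0 ∧ ((k : Int) + 1) ≤ np ∧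
        PySem.Int.floordiv t ((k : Int) + 1) ≤ ni
    then (k : Int) + 1 else csfMax np ni t k

theorem csfMax_bounds (np ni t : Int) (K : Nat) :
    1 ≤ csfMax np ni t K ∧ csfMax np ni t K ≤ max 1 (K : Int) := by
  induction K with
  | zero => simp [csfMax]
  | succ k ih =>
    simp only [csfMax]
    split
    · push_cast; omega
    · push_cast; omega

theorem floordiv_one (t : Int) : PySem.Int.floordiv t 1 = t := by
  rw [PySem.Int.floordiv_eq_ediv_of_pos (by omega)]; exact Int.ediv_one t

-- A's whole computation with range bound N+1, characterised by csfMax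
theorem calcA_char (np ni t : Int) (N : Nat) :
    ((PySem.List.pyRange 1 ((N : Int) + 1) 1).foldl
      (fun acc i =>
        if PySem.Int.mod t i = 0 then acc ++ [(i, PySem.Int.floordiv t i)] else acc) []).foldl
      (fun (b : Int × Int) (f : Int × Int) =>
        if f.1 ≤ np ∧ f.2 ≤ ni then (if f.1 > b.1 then f else b) else b)
      (1, t)
    = (csfMax np ni t N, PySem.Int.floordiv t (csfMax np ni t N)) := by
  induction N with
  | zero =>
    rw [show ((0 : Nat) : Int) + 1 = 1 by norm_num, PySem.List.pyRange_one_eq_nil (by omega)]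
    simp [csfMax]
  | succ k ih =>
    have hsplit : PySem.List.pyRange 1 (((k + 1 : Nat) : Int) + 1) 1
        = PySem.List.pyRange 1 ((k : Int) + 1) 1 ++ [(k : Int) + 1] := by
      have := PySem.List.pyRange_one_succ_right (a := 1) (b := (k : Int) + 1) (by omega)
      push_cast at this
      convert this using 2
    rw [hsplit, List.foldl_append, List.foldl_cons, List.foldl_nil]
    by_cases hdvd : PySem.Int.mod t ((k : Int) + 1) = 0
    · rw [if_pos hdvd, List.foldl_append, List.foldl_cons, List.foldl_nil, ih]
      show (if ((k : Int) + 1 ≤ np ∧ PySem.Int.floordiv t ((k : Int) + 1) ≤ ni) then _ else _) = _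
      have hb := csfMax_bounds np ni t k
      by_cases hcase : ((k : Int) + 1 ≤ np ∧ PySem.Int.floordiv t ((k : Int) + 1) ≤ ni)
      · rw [if_pos hcase]
        by_cases hk : k = 0
        · subst hk
          norm_num [csfMax, floordiv_one]
        · have hgt : csfMax np ni t k < (k : Int) + 1 := by
            have hk1 : (1 : Int) ≤ (k : Int) := by exact_mod_cast Nat.one_le_iff_ne_zero.mpr hk
            have := hb.2
            omega
          rw [if_pos (by exact hgt)]
          have hmx : csfMax np ni t (k + 1) = (k : Int) + 1 := by
            simp only [csfMax]
            rw [if_pos ⟨by omega, hdvd, hcase.1, hcase.2⟩]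
          rw [hmx]
      · rw [if_neg hcase]
        have hmx : csfMax np ni t (k + 1) = csfMax np ni t k := by
          simp only [csfMax]
          rw [if_neg (by rintro ⟨-, -, h2, h3⟩; exact hcase ⟨h2, h3⟩)]
        rw [hmx]
    · rw [if_neg hdvd, ih]
      have hmx : csfMax np ni t (k + 1) = csfMax np ni t k := by
        simp only [csfMax]
        rw [if_neg (by rintro ⟨-, h1, -⟩; exact hdvd h1)]
      rw [hmx]

theorem csfGo_zero (ni t d : Int) : csfGo ni t d 0 = [1, t] := rfl

theorem csfGo_succ (ni t d : Int) (f : Nat) :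
    csfGo ni t d (Nat.succ f)
      = if 1 < d then
          (if PySem.Int.mod t d = 0 ∧ PySem.Int.floordiv t d ≤ ni then
            [d, PySem.Int.floordiv t d]
          else csfGo ni t (d - 1) f)
        else [1, t] := rfl

-- B's descending scan computes the same maximum, provided the start is ≤ np
theorem csfGo_char (np ni t : Int) (K : Nat) (fuel : Nat) (hf : K ≤ fuel)
    (hnp : (K : Int) ≤ np) :
    csfGo ni t (K : Int) fuel = [csfMax np ni t K, PySem.Int.floordiv t (csfMax np ni t K)] := by
  induction K generalizing fuel with
  | zero =>
    cases fuel with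
    | zero => rw [csfGo_zero]; norm_num [csfMax, floordiv_one]
    | succ f => rw [csfGo_succ, if_neg (by norm_num)]; norm_num [csfMax, floordiv_one]
  | succ k ih =>
    have hcast : ((k + 1 : Nat) : Int) = (k : Int) + 1 := by push_cast; ring
    cases fuel with
    | zero => omega
    | succ f =>
      rw [csfGo_succ, hcast]
      by_cases hk : k = 0
      · subst hk
        rw [if_neg (by norm_num)]
        norm_num [csfMax, floordiv_one]
      · rw [if_pos (by omega)]
        rw [hcast] at hnp
        by_cases hc : PySem.Int.mod t ((k : Int) + 1) = 0 ∧
            PySem.Int.floordiv t ((k : Int) + 1) ≤ ni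
        · rw [if_pos hc]
          have hmx : csfMax np ni t (k + 1) = (k : Int) + 1 := by
            simp only [csfMax]
            rw [if_pos ⟨by omega, hc.1, hnp, hc.2⟩]
          rw [hmx]
        · rw [if_neg hc]
          have hmx : csfMax np ni t (k + 1) = csfMax np ni t k := by
            simp only [csfMax]
            rw [if_neg (by rintro ⟨-, h1, -, h3⟩; exact hc ⟨h1, h3⟩)]
          rw [hmx, show (k : Int) + 1 - 1 = (k : Int) from by ring]
          exact ih f (by omega) (by omega)

-- above min(np,t), no divisor of a nonnegative t can be valid; csfMax is constant there
theorem csfMax_stable (np ni t : Int) (_ht : 0 ≤ t) (m K : Nat)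
    (hm : min np t ≤ (m : Int)) (hK : m ≤ K) (hKt : (K : Int) ≤ t) :
    csfMax np ni t K = csfMax np ni t m := by
  induction K with
  | zero => cases Nat.le_zero.mp hK; rfl
  | succ k ih =>
    by_cases hk : Nat.succ k = m
    · subst hk; rfl
    · have hmk : m ≤ k := by omega
      have heq : csfMax np ni t (Nat.succ k) = csfMax np ni t k := by
        simp only [csfMax]
        rw [if_neg (by
          rintro ⟨-, hdvd, h2, -⟩
          have h3 : (k : Int) + 1 > min np t := by omega
          have h4 : (k : Int) + 1 ≤ t := by push_cast at hKt; omega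
          -- so k+1 > np, contradicting h2… unless k+1 > t, impossible by h4
          rcases lt_or_ge np ((k : Int) + 1) with h | h
          · omega
          · have : min np t ≥ (k : Int) + 1 := le_min h h4
            omega)]
      rw [heq]
      exact ih hmk (by push_cast at hKt ⊢; omega)

-- ===== VERDICT (by name: the statement is the Claim_ definition above) =====
theorem calculate_split_factors_spec : Claim_equal_calculate_split_factors := by
  intro np ni t _
  unfold Spec_calculate_split_factors
  by_cases ht : 0 ≤ t
  · -- nonnegative target: both sides equal [csfMax, t // csfMax]
    obtain ⟨T, rfl⟩ : ∃ T : Nat, t = (T : Int) := ⟨t.toNat, (Int.toNat_of_nonneg ht).symm⟩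
    have hA : calculate_split_factors np ni (T : Int)
        = [csfMax np ni (T : Int) T, PySem.Int.floordiv (T : Int) (csfMax np ni (T : Int) T)] := by
      simp only [calculate_split_factors]
      rw [calcA_char np ni (T : Int) T]
    rw [hA]
    unfold calculate_split_factors_alt
    by_cases hmin : 0 < min np (T : Int)
    · obtain ⟨m, hm⟩ : ∃ m : Nat, min np (T : Int) = (m : Int) :=
        ⟨(min np (T : Int)).toNat, (Int.toNat_of_nonneg (by omega)).symm⟩
      rw [hm]
      have hmt : (m : Int) ≤ (T : Int) := by rw [← hm]; exact min_le_right _ _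
      have hmnp : (m : Int) ≤ np := by rw [← hm]; exact min_le_left _ _
      have htoNat : ((m : Int)).toNat = m := by simp
      rw [htoNat, csfGo_char np ni (T : Int) m m (le_refl m) hmnp]
      have hstab : csfMax np ni (T : Int) T = csfMax np ni (T : Int) m :=
        csfMax_stable np ni (T : Int) ht m T (le_of_eq hm) (by exact_mod_cast hmt) (le_refl _)
      rw [hstab]
    · -- min ≤ 0: B returns [1, t] immediately; csfMax at T is 1
      have hgo : csfGo ni (T : Int) (min np (T : Int)) (min np (T : Int)).toNat = [1, (T : Int)] := by
        cases hfe : (min np (T : Int)).toNat with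
        | zero => simp [csfGo]
        | succ f => simp only [csfGo]; rw [if_neg (by omega)]
      rw [hgo]
      have hstab : csfMax np ni (T : Int) T = csfMax np ni (T : Int) 0 :=
        csfMax_stable np ni (T : Int) ht 0 T (by omega) (Nat.zero_le _) (le_refl _)
      rw [hstab]
      simp [csfMax]
  · -- negative target: A's range is empty, B's start is < 1
    have ht' : t < 0 := by omega
    have hA : calculate_split_factors np ni t = [1, t] := by
      simp only [calculate_split_factors]
      rw [PySem.List.pyRange_one_eq_nil (by omega)]
      simp
    rw [hA]
    unfold calculate_split_factors_alt
    have hminlt : min np t < 1 := by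
      have := min_le_right np t; omega
    have hgo : csfGo ni t (min np t) (min np t).toNat = [1, t] := by
      cases hfe : (min np t).toNat with
      | zero => simp [csfGo]
      | succ f => simp only [csfGo]; rw [if_neg (by omega)]
    rw [hgo]
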